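-- pv_equiv track=rewrite | github.com/meng89/wpi | wpi/inf/loads.py | _token_handle
-- ===== SOURCE A (Python) =====
-- def _token_handle(chars):
--     i = 0
--     v = ''
--     in_token = False
--
--     for i in range(len(chars)):
--         v += chars[i]
--
--         if chars[i] == '%':
--             if in_token is True:
--                 _ = chars[i+1:].strip()
--                 if _ == '' or _[0] in (',', ';', '='):
--                     break
--             else:
--                 in_token = True
--
--     return v, chars[i+1:]
-- ===== SOURCE B (Python) =====
-- def _token_handle(chars):
--     n = len(chars)
--     # nxt[i] = first non-whitespace character of chars[i:], or None (one backward pass)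
--     nxt = [None] * (n + 1)
--     for i in range(n - 1, -1, -1):
--         nxt[i] = nxt[i + 1] if chars[i].isspace() else chars[i]
--     seen = False
--     for i in range(n):
--         if chars[i] == '%':
--             if seen:
--                 c = nxt[i + 1]
--                 if c is None or c in ',;=':
--                     return chars[:i + 1], chars[i + 1:]
--             else:
--                 seen = True
--     return chars, ''
-- ===== Notes on version B (the rewrite author's own statement) =====
-- stated objective: alternative
-- what changed: Replaced A's per-'%' suffix strip and per-char string concatenation with one backward pass precomputing the first non-whitespace character of every suffix, then a single forward scan that slices the string once at the break index.
import Mathlib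
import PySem

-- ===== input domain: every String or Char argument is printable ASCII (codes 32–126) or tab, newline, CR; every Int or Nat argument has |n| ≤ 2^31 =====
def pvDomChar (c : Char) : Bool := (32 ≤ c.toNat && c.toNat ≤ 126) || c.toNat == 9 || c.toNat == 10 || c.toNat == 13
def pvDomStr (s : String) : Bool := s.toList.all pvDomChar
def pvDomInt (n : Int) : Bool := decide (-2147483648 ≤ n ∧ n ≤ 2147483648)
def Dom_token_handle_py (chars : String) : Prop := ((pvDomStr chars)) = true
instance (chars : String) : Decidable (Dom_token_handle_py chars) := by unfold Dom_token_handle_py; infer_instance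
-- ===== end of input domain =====

-- B replaces A's per-'%' suffix strip and per-char concatenation with a precomputed
-- first-non-whitespace-of-suffix table and a single forward scan that slices once.

-- ===== PORT A =====
-- A's for-loop with break, transcribed as recursion on the index i; v is the accumulated
-- prefix string.  When the loop runs to completion (or chars is empty) Python's final
-- chars[i+1:] is the empty string (i = len-1, resp. i = 0 on ''), written "" here.
def tokA (cs : List Char) (i : Nat) (v : List Char) (inTok : Bool) : String × String :=
  if h : i < cs.length then
    let c := cs[i]
    let v' := v ++ [c]
    if c = '%' then
      if inTok then
        let t := PySem.Chars.strip (cs.drop (i+1))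
        if t = [] ∨ t.head? = some ',' ∨ t.head? = some ';' ∨ t.head? = some '=' then
          (String.ofList v', String.ofList (cs.drop (i+1)))
        else tokA cs (i+1) v' inTok
      else tokA cs (i+1) v' true
    else tokA cs (i+1) v' inTok
  else (String.ofList v, "")
termination_by cs.length - i

def token_handle_py (chars : String) : String × String :=
  tokA chars.toList 0 [] false

-- ===== PORT B =====
-- Source B's backward pass: nxtArr cs is the (n+1)-entry table, entry i = first
-- non-whitespace char of cs.drop i (None past the end).
def nxtArr : List Char → List (Option Char)
  | [] => [none]
  | c :: rest =>
    let t := nxtArr rest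
    (if PySem.Chars.isspace c then t.headD none else some c) :: t

-- Source B's forward scan; returns from inside the loop at the break index.
def tokB (cs : List Char) (nxt : List (Option Char)) (i : Nat) (seen : Bool) : String × String :=
  if h : i < cs.length then
    if cs[i] = '%' then
      if seen then
        match nxt.getD (i+1) none with
        | none => (String.ofList (cs.take (i+1)), String.ofList (cs.drop (i+1)))
        | some c =>
          if c = ',' ∨ c = ';' ∨ c = '=' then
            (String.ofList (cs.take (i+1)), String.ofList (cs.drop (i+1)))
          else tokB cs nxt (i+1) seen
      else tokB cs nxt (i+1) true
    else tokB cs nxt (i+1) seen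
  else (String.ofList cs, "")
termination_by cs.length - i

def token_handle_py_alt (chars : String) : String × String :=
  let cs := chars.toList
  tokB cs (nxtArr cs) 0 false

-- ===== PRECONDITION & SPEC =====
def Spec_token_handle_py (chars : String) (out : String × String) : Prop := out = token_handle_py_alt chars
instance (chars : String) (out : String × String) : Decidable (Spec_token_handle_py chars out) := by unfold Spec_token_handle_py; infer_instance

-- ===== CLAIM (what is proved, stated in full; the proofs are below) =====
def Claim_equal_token_handle_py : Prop := ∀ (chars : String), Dom_token_handle_py chars → Spec_token_handle_py chars (token_handle_py chars)

-- ===== LEMMAS AND PROOFS =====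

-- head of strip = head of dropWhile isspace (strip only removes further chars at the end)
lemma strip_head? (s : List Char) :
    (PySem.Chars.strip s).head? = (s.dropWhile PySem.Chars.isspace).head? := by
  unfold PySem.Chars.strip PySem.Chars.rstrip PySem.Chars.lstrip
  cases hl : s.dropWhile PySem.Chars.isspace with
  | nil => simp
  | cons x r =>
    have hx : PySem.Chars.isspace x = false := by
      have := List.head?_dropWhile_not PySem.Chars.isspace s
      rw [hl] at this; simpa using this
    simp only [List.reverse_cons, List.dropWhile_append]
    split
    · simp [hx]
    · simp [List.dropWhile_cons]

lemma nxt_getD (cs : List Char) (i : Nat) :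
    (nxtArr cs).getD i none = ((cs.drop i).dropWhile PySem.Chars.isspace).head? := by
  induction cs generalizing i with
  | nil => cases i <;> simp [nxtArr]
  | cons c rest ih =>
    cases i with
    | zero =>
      simp only [nxtArr, List.getD_cons_zero, List.drop_zero, List.dropWhile_cons]
      cases h : PySem.Chars.isspace c with
      | false => simp
      | true =>
        simp only [List.headD_eq_head?_getD, List.head?_eq_getElem?]
        have h0 := ih 0
        simp only [List.drop_zero, List.head?_eq_getElem?, List.getD_eq_getElem?_getD] at h0
        exact h0
    | succ j =>
      simp only [nxtArr, List.getD_cons_succ, List.drop_succ_cons]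
      exact ih j

lemma tok_loop_eq (cs : List Char) :
    ∀ n i tok, cs.length - i ≤ n →
      tokA cs i (cs.take i) tok = tokB cs (nxtArr cs) i tok := by
  intro n
  induction n with
  | zero =>
    intro i tok hle
    have hge : cs.length ≤ i := by omega
    rw [tokA, tokB, dif_neg (by omega), dif_neg (by omega), List.take_of_length_le hge]
  | succ m ih =>
    intro i tok hle
    rw [tokA, tokB]
    by_cases h : i < cs.length
    · rw [dif_pos h, dif_pos h]
      simp only []
      have htake : cs.take i ++ [cs[i]] = cs.take (i+1) := by
        rw [List.take_add_one]
        simp [List.getElem?_eq_getElem h]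
      have hrec : ∀ t, tokA cs (i+1) (cs.take i ++ [cs[i]]) t
          = tokB cs (nxtArr cs) (i+1) t := by
        intro t
        rw [htake]
        exact ih (i+1) t (by omega)
      by_cases hc : cs[i] = '%'
      · rw [if_pos hc, if_pos hc]
        cases tok with
        | false =>
          rw [if_neg (by simp), if_neg (by simp)]
          exact hrec true
        | true =>
          rw [if_pos rfl, if_pos rfl]
          rw [nxt_getD, ← strip_head?]
          cases hh : (PySem.Chars.strip (cs.drop (i+1))).head? with
          | none =>
            have ht : PySem.Chars.strip (cs.drop (i+1)) = [] :=
              List.head?_eq_none_iff.mp hh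
            rw [if_pos (Or.inl ht), htake]
          | some x =>
            have ht : ¬ PySem.Chars.strip (cs.drop (i+1)) = [] := by
              intro he; rw [he] at hh; simp at hh
            by_cases hx : x = ',' ∨ x = ';' ∨ x = '='
            · have hA : PySem.Chars.strip (cs.drop (i+1)) = []
                  ∨ some x = some ',' ∨ some x = some ';' ∨ some x = some '=' := by
                rcases hx with h1 | h1 | h1 <;> subst h1 <;> simp
              rw [if_pos hA]
              dsimp only
              rw [if_pos hx, htake]
            · have hA : ¬ (PySem.Chars.strip (cs.drop (i+1)) = []
                  ∨ some x = some ',' ∨ some x = some ';' ∨ some x = some '=') := by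
                simp only [Option.some_inj]
                tauto
              rw [if_neg hA]
              dsimp only
              rw [if_neg hx]
              exact hrec true
      · rw [if_neg hc, if_neg hc]
        exact hrec tok
    · have hge : cs.length ≤ i := by omega
      rw [dif_neg h, dif_neg h, List.take_of_length_le hge]

-- ===== VERDICT (by name: the statement is the Claim_ definition above) =====
theorem token_handle_py_spec : Claim_equal_token_handle_py := by
  intro chars _
  unfold Spec_token_handle_py token_handle_py token_handle_py_alt
  have := tok_loop_eq chars.toList chars.toList.length 0 false (by omega)
  simpa using this
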